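-- pv_equiv track=rewrite | github.com/HsuPengbo/DeepLearning-201800130086 | Homework0/homework_0.py | pad_pattern_end
-- ===== SOURCE A (Python) =====
-- def pad_pattern_end(x):
--     """
--     Takes one 3-dimensional array.
--     Your task is to pad the instances from the end position as shown in the example below.
--     That is, you need to pad the reflection of the utterance mirrored along the edge of the array.
--     :return:
--     """
--     L=max(map(len,x))
--     z=[]
--     for d in x:
--         p=(d+(d[::-1]+d)*L)[:L]
--         z.append(p)
--     return z
--     pass
-- ===== SOURCE B (Python) =====
-- def _mirror(d, n, i):
--     j = (i - n) % (2 * n)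
--     return d[n - 1 - j] if j < n else d[j - n]
--
--
-- def _reflect_row(d, L):
--     n = len(d)
--     if n == 0:
--         return []
--     return [d[i] if i < n else _mirror(d, n, i) for i in range(L)]
--
--
-- def pad_pattern_end(x):
--     L = max(map(len, x))
--     return [_reflect_row(d, L) for d in x]
-- ===== Notes on version B (the rewrite author's own statement) =====
-- stated objective: faster
-- what changed: Instead of materialising d+(reversed(d)+d)*L (length ~2*len(d)*L) per row and truncating, B computes each of the L output entries directly with a reflection formula using (i-n) mod 2n.
-- outside the precondition, e.g. on pad_pattern_end([]): A raises ValueError, B raises ValueError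
import Mathlib
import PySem

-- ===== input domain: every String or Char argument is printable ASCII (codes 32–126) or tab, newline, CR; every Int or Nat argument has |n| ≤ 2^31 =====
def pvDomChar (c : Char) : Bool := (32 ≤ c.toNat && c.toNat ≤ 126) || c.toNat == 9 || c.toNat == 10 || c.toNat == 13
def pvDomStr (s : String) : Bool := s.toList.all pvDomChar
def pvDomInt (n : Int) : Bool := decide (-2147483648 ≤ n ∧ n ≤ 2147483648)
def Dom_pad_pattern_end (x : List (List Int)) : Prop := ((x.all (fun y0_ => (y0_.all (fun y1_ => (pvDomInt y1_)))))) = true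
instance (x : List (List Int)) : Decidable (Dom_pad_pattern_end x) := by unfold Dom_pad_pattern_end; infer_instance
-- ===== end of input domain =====

-- B replaces A's per-row construction of the length-(n+2nL) list d+(reversed(d)+d)*L followed by
-- truncation with a direct per-index reflection formula ((i-n) mod 2n); measured faster (asymptotic).


-- ===== PORT A =====
-- A: L = max(map(len, x)); for each d: p = (d + (d[::-1]+d)*L)[:L]; append.
-- The 'none' branch of max? corresponds to the ValueError Python raises on x = []; excluded by Pre_.
def pad_pattern_end (x : List (List Int)) : List (List Int) :=
  match PySem.List.max? (x.map (fun d => PySem.List.len d)) (fun v => v) with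
  | none => []
  | some L =>
    x.foldl (fun z d =>
      z ++ [PySem.List.slice
              (d ++ (List.replicate L.toNat (((PySem.List.slice? d none none (-1)).getD []) ++ d)).flatten)
              none (some L)]) []

-- ===== PORT B =====
-- _mirror(d, n, i): the indices n-1-j and j-n are provably in range, so pyGetD's default is dead code.
def pvMirror (d : List Int) (n i : Int) : Int :=
  let j := PySem.Int.mod (i - n) (2 * n)
  if j < n then PySem.List.pyGetD d (n - 1 - j) 0 else PySem.List.pyGetD d (j - n) 0

-- _reflect_row(d, L)
def pvReflectRow (d : List Int) (L : Int) : List Int :=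
  let n : Int := PySem.List.len d
  if n = 0 then []
  else (PySem.List.pyRange 0 L 1).map
    (fun i => if i < n then PySem.List.pyGetD d i 0 else pvMirror d n i)

def pad_pattern_end_alt (x : List (List Int)) : List (List Int) :=
  match PySem.List.max? (x.map (fun d => PySem.List.len d)) (fun v => v) with
  | none => []
  | some L => x.map (fun d => pvReflectRow d L)

-- ===== PRECONDITION & SPEC =====
-- Pre_ excludes only x = [], where Python A raises ValueError (max() of an empty sequence).
def Pre_pad_pattern_end (x : List (List Int)) : Prop := x ≠ []
instance (x : List (List Int)) : Decidable (Pre_pad_pattern_end x) := by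
  unfold Pre_pad_pattern_end; infer_instance

def pvWitness_pad_pattern_end : List (List Int) := [[1, 2, 3], [4, 5]]

def Spec_pad_pattern_end (x : List (List Int)) (out : List (List Int)) : Prop := out = pad_pattern_end_alt x
instance (x : List (List Int)) (out : List (List Int)) : Decidable (Spec_pad_pattern_end x out) := by
  unfold Spec_pad_pattern_end; infer_instance

-- ===== CLAIM (what is proved, stated in full; the proofs are below) =====
def Claim_equal_pad_pattern_end : Prop :=
  ∀ (x : List (List Int)), Dom_pad_pattern_end x → Pre_pad_pattern_end x →
    Spec_pad_pattern_end x (pad_pattern_end x)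

-- ===== LEMMAS AND PROOFS =====

-- element of the cyclic repetition: index mod the period length
theorem pv_flatten_replicate_get (per : List Int) (m t : Nat) (ht : t < m * per.length)
    (h2 : t % per.length < per.length) :
    ((List.replicate m per).flatten)[t]'(by
        simp only [List.length_flatten, List.map_replicate, List.sum_replicate, smul_eq_mul]
        omega) =
      per[t % per.length]'h2 := by
  induction m generalizing t with
  | zero => omega
  | succ m ih =>
    have hrep : (List.replicate (m+1) per).flatten = per ++ (List.replicate m per).flatten := by
      simp [List.replicate_succ]
    have hsm : (m + 1) * per.length = m * per.length + per.length := by ring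
    by_cases hlt : t < per.length
    · simp only [hrep, Nat.mod_eq_of_lt hlt]
      rw [List.getElem_append_left hlt]
    · have hper : 0 < per.length := by omega
      simp only [hrep]
      rw [List.getElem_append_right (by omega)]
      have ht' : t - per.length < m * per.length := by omega
      have hmod : (t - per.length) % per.length = t % per.length := by
        conv_rhs => rw [Nat.mod_eq_sub_mod (by omega)]
      rw [ih (t - per.length) ht' (by omega)]
      simp only [hmod]

-- core: A's row expression equals B's row when len d ≤ L
theorem pv_row_eq (d : List Int) (L : Int) (hL0 : 0 ≤ L) (hdL : (d.length : Int) ≤ L) :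
    PySem.List.slice
        (d ++ (List.replicate L.toNat (((PySem.List.slice? d none none (-1)).getD []) ++ d)).flatten)
        none (some L) = pvReflectRow d L := by
  rw [PySem.List.slice?_none_none_neg_one]
  simp only [Option.getD_some]
  rw [PySem.List.slice_to _ hL0]
  unfold pvReflectRow
  rw [PySem.List.len_eq]
  set n : Nat := d.length with hn
  by_cases hn0 : n = 0
  · have hd : d = [] := List.eq_nil_of_length_eq_zero hn0
    simp [hd, hn0]
  · have hnpos : 0 < n := Nat.pos_of_ne_zero hn0
    have hnI : ((n : Int) = 0) = False := by simp; omega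
    simp only [hnI, if_false]
    rw [PySem.List.pyRange_one]
    simp only [sub_zero, List.map_map]
    set Ln : Nat := L.toNat with hLn
    have hLnn : n ≤ Ln := by omega
    set per : List Int := d.reverse ++ d with hper
    have hperlen : per.length = 2 * n := by simp [hper, hn]; omega
    apply List.ext_getElem
    · simp only [List.length_take, List.length_append, List.length_flatten,
        List.map_replicate, List.sum_replicate, smul_eq_mul, List.length_map,
        List.length_range, hperlen]
      have : 0 < 2 * n := by omega
      have : Ln ≤ Ln * (2 * n) := Nat.le_mul_of_pos_right Ln this
      omega
    · intro k h1 h2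
      have hk : k < Ln := by simpa using h2
      rw [List.getElem_take, List.getElem_map, List.getElem_range]
      simp only [Function.comp_apply, zero_add]
      by_cases hkn : k < n
      · rw [List.getElem_append_left (hn ▸ hkn)]
        rw [if_pos (by exact_mod_cast hkn)]
        rw [PySem.List.pyGetD_natCast, List.getD_eq_getElem d 0 (hn ▸ hkn)]
      · -- k ≥ n : element comes from the cyclic part
        rw [List.getElem_append_right (by omega)]
        have htlt : k - n < Ln * per.length := by
          rw [hperlen]
          have : 0 < 2 * n := by omega
          have := Nat.le_mul_of_pos_right Ln this
          omega
        have hmodlt : (k - n) % per.length < per.length := Nat.mod_lt _ (by omega)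
        rw [pv_flatten_replicate_get per Ln (k - n) (by rw [hn]; exact htlt) (by rw [hn]; exact hmodlt)]
        set j : Nat := (k - n) % per.length with hj
        have hjlt : j < 2 * n := hperlen ▸ hmodlt
        rw [if_neg (by omega)]
        unfold pvMirror
        have hjI : PySem.Int.mod ((k : Int) - (n : Int)) (2 * (n : Int)) = (j : Int) := by
          have h1 : ((k : Int) - (n : Int)) = ((k - n : Nat) : Int) := by omega
          have h2 : (2 * (n : Int)) = ((2 * n : Nat) : Int) := by push_cast; ring
          rw [h1, h2, PySem.Int.mod_natCast]
          rw [hj, hperlen]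
        simp only [hjI]
        by_cases hjn : j < n
        · rw [if_pos (by exact_mod_cast hjn)]
          rw [List.getElem_append_left (by simpa using hjn)]
          rw [List.getElem_reverse]
          have hidx : ((n : Int) - 1 - (j : Int)) = ((n - 1 - j : Nat) : Int) := by omega
          rw [hidx, PySem.List.pyGetD_natCast, List.getD_eq_getElem d 0 (by omega)]
        · rw [if_neg (by omega)]
          rw [List.getElem_append_right (by simpa using hjn)]
          have hidx : ((j : Int) - (n : Int)) = ((j - n : Nat) : Int) := by omega
          rw [hidx, PySem.List.pyGetD_natCast, List.getD_eq_getElem d 0 (by omega)]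
          congr 1
          simp only [List.length_reverse]
          omega

-- ===== VERDICT (by name: the statement is the Claim_ definition above) =====
theorem pad_pattern_end_spec : Claim_equal_pad_pattern_end := by
  intro x _ hpre
  unfold Spec_pad_pattern_end pad_pattern_end pad_pattern_end_alt
  obtain ⟨L, hL⟩ : ∃ L, PySem.List.max? (x.map (fun d => PySem.List.len d)) (fun v => v) = some L := by
    rcases h : PySem.List.max? (x.map (fun d => PySem.List.len d)) (fun v => v) with _ | L
    · rw [PySem.List.max?_eq_none_iff] at h
      simp at h
      exact absurd h hpre
    · exact ⟨L, rfl⟩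
  rw [hL]
  dsimp only
  have hLmem := PySem.List.max?_mem hL
  have hL0 : 0 ≤ L := by
    rcases List.mem_map.mp hLmem with ⟨d, _, hd⟩
    rw [← hd, PySem.List.len_eq]
    positivity
  rw [PySem.List.foldl_append_eq_flatMap, List.nil_append]
  have hmax := PySem.List.max?_isMax hL
  have key : (x.flatMap (fun d => [PySem.List.slice
        (d ++ (List.replicate L.toNat (((PySem.List.slice? d none none (-1)).getD []) ++ d)).flatten)
        none (some L)])) = x.map (fun d => pvReflectRow d L) := by
    rw [List.map_eq_flatMap, List.flatMap_def, List.flatMap_def]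
    congr 1
    apply List.map_congr_left
    intro d hd
    have hlen := hmax (PySem.List.len d) (List.mem_map_of_mem hd)
    rw [PySem.List.len_eq] at hlen
    rw [pv_row_eq d L hL0 hlen]
  rw [key]
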